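-- pv_equiv track=rewrite | github.com/kleeder/it2fss | it2fssV3.py | note_format
-- ===== SOURCE A (Python) =====
-- from math import floor, log2
--
-- NOTE_NAMES = ['a', 'A', 'b', 'c', 'C', 'd', 'D', 'e', 'f', 'F', 'g', 'G']
--
-- VALUE_NAMES = ['f', '8', '4', '2', '1']
--
-- def note_format(note, rows, vol, cmdVal, speed):
--     if vol != None:
--         if vol == 10:
--             vol = "a"
--         elif vol == 11:
--             vol = "b"
--         elif vol == 12:
--             vol = "c"
--         elif vol == 13:
--             vol = "d"
--         elif vol == 14:
--             vol = "e"
--         elif vol >= 15: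
--             vol = "f"
--
--     lengths = []
--     while rows > 0:
--         power = min(4, floor(log2(rows)))
--         lengths.append(VALUE_NAMES[power])
--         rows -= 2 ** power
--
--     strings = []
--
--     for length in lengths:
--         if cmdVal != None:
--             temp = '{}\n\n'.format(2500 // cmdVal * speed)
--             strings.append('t' + temp)
--         if note is not None:
--             if note < 120:
--                 fs_note = note - 9
--                 octave = fs_note // 12
--                 if 1 <= octave <= 7:
--                     name = NOTE_NAMES[fs_note % 12]
--                     strings.append(name + str(octave) + length + str(vol))
--                 elif octave == 0:
--                     strings.append('K-' + length)
--                 elif octave == 8: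
--                     strings.append('S-' + length)
--                 else:
--                     strings.append('x-' + length + str(vol))
--             else:
--                 strings.append('r-' + length)
--         else:
--             strings.append('r-' + length)
--
--     if strings:
--         return '\n'.join(strings) + '\n'
--     return ''
-- ===== SOURCE B (Python) =====
-- NOTE_NAMES = ['a', 'A', 'b', 'c', 'C', 'd', 'D', 'e', 'f', 'F', 'g', 'G']
--
-- VALUE_NAMES = ['f', '8', '4', '2', '1']
--
-- def _entries(note, length, vol_s, cmdVal, speed):
--     out = []
--     if cmdVal is not None:
--         out.append('t{}\n\n'.format(2500 // cmdVal * speed))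
--     if note is None or note >= 120:
--         out.append('r-' + length)
--     else:
--         octave, idx = divmod(note - 9, 12)
--         if 1 <= octave <= 7:
--             out.append(NOTE_NAMES[idx] + str(octave) + length + vol_s)
--         elif octave == 0:
--             out.append('K-' + length)
--         elif octave == 8:
--             out.append('S-' + length)
--         else:
--             out.append('x-' + length + vol_s)
--     return out
--
-- def note_format(note, rows, vol, cmdVal, speed):
--     if vol is not None and vol >= 10:
--         vol_s = 'abcdef'[min(vol, 15) - 10]
--     else:
--         vol_s = str(vol)
--     if rows > 0:
--         q, r = divmod(rows, 16)
--         lengths = ['1'] * q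
--         for exp in (3, 2, 1, 0):
--             if r & (1 << exp):
--                 lengths.append(VALUE_NAMES[exp])
--     else:
--         lengths = []
--     strings = [s for length in lengths for s in _entries(note, length, vol_s, cmdVal, speed)]
--     return '\n'.join(strings) + '\n' if strings else ''
-- ===== Notes on version B (the rewrite author's own statement) =====
-- stated objective: alternative
-- what changed: The greedy while-loop that repeatedly takes min(4, floor(log2(rows))) and subtracts 2**power is replaced by a closed-form divmod(rows, 16) giving ['1']*q plus a fixed high-to-low bit extraction of the remainder, and the per-length string emission is factored into a helper flattened by a comprehension instead of a mutating accumulator loop.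
import Mathlib
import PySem

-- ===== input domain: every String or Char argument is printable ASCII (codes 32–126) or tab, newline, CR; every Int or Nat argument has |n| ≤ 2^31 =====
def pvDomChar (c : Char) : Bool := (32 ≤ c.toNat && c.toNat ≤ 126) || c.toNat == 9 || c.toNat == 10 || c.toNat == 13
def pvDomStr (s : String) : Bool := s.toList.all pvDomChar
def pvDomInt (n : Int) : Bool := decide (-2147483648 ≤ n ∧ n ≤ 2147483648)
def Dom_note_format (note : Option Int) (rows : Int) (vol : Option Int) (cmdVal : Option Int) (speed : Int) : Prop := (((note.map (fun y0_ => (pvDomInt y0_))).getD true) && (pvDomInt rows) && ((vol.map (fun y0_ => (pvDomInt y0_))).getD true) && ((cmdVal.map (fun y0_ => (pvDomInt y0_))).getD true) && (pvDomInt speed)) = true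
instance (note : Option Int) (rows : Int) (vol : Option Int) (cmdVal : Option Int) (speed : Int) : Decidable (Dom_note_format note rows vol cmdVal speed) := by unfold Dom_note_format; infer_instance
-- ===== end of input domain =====

-- B replaces A's greedy `while rows > 0` log2-subtraction loop by a closed-form divmod/bit
-- decomposition of `rows` and builds the output by a flat helper per length (objective: alternative).
-- (A's `floor(log2(rows))` on a Python float is exact for 0 < rows ≤ 2^31, the stated domain.)

-- ===== PORT A =====
def NOTE_NAMES : List String := ["a", "A", "b", "c", "C", "d", "D", "e", "f", "F", "g", "G"]
def VALUE_NAMES : List String := ["f", "8", "4", "2", "1"]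

-- A's `while rows > 0` loop, with a fuel argument making the same computation total:
-- each pass subtracts at least 1 from rows, so fuel = rows.toNat is never exhausted.
-- `min(4, floor(log2(rows)))` is ported exactly as `min 4 (Nat.log2 rows.toNat)` (rows > 0 here).
def lengthsGoA : Nat → Int → List String
  | 0, _ => []
  | fuel + 1, rows =>
    if rows > 0 then
      let power : Nat := min 4 (Nat.log2 rows.toNat)
      VALUE_NAMES.getD power "" :: lengthsGoA fuel (rows - 2 ^ power)
    else []

-- A's vol-normalisation elif chain merged with the later `str(vol)` (Python re-binds `vol`
-- to a string in the chain; `str` of the final value is what every use site reads; str(None)="None").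
def volStrA (vol : Option Int) : String :=
  match vol with
  | none => "None"
  | some v =>
    if v = 10 then "a"
    else if v = 11 then "b"
    else if v = 12 then "c"
    else if v = 13 then "d"
    else if v = 14 then "e"
    else if v ≥ 15 then "f"
    else PySem.Int.toStr v

-- the body of A's `for length in lengths` loop (named so the fold lemmas can cite it)
def bodyA (note : Option Int) (volS : String) (cmdVal : Option Int) (speed : Int)
    (strings : List String) (length : String) : List String :=
  let strings :=
    match cmdVal with
    | some c => strings ++ ["t" ++ PySem.Int.toStr (PySem.Int.floordiv 2500 c * speed) ++ "\n\n"]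
    | none => strings
  match note with
  | some n =>
    if n < 120 then
      let fs_note := n - 9
      let octave := PySem.Int.floordiv fs_note 12
      if 1 ≤ octave ∧ octave ≤ 7 then
        strings ++ [NOTE_NAMES.getD (PySem.Int.mod fs_note 12).toNat "" ++ PySem.Int.toStr octave ++ length ++ volS]
      else if octave = 0 then strings ++ ["K-" ++ length]
      else if octave = 8 then strings ++ ["S-" ++ length]
      else strings ++ ["x-" ++ length ++ volS]
    else strings ++ ["r-" ++ length]
  | none => strings ++ ["r-" ++ length]

def note_format (note : Option Int) (rows : Int) (vol : Option Int) (cmdVal : Option Int) (speed : Int) : String :=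
  let volS := volStrA vol
  let lengths := lengthsGoA rows.toNat rows
  let strings := lengths.foldl (bodyA note volS cmdVal speed) []
  if strings ≠ [] then PySem.Str.join "\n" strings ++ "\n" else ""

-- ===== PORT B =====
-- B's vol_s: 'abcdef'[min(vol, 15) - 10] when vol is not None and vol >= 10, else str(vol).
def volStrB (vol : Option Int) : String :=
  match vol with
  | some v =>
    if 10 ≤ v then
      match PySem.Str.pyGet? "abcdef" (min v 15 - 10) with
      | some c => String.ofList [c]
      | none => ""
    else PySem.Int.toStr v
  | none => "None"

-- B's closed-form lengths: q, r = divmod(rows, 16); ['1'] * q then the bits of r, high to low.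
def lengthsB (rows : Int) : List String :=
  if rows > 0 then
    let q := PySem.Int.floordiv rows 16
    let r := PySem.Int.mod rows 16
    [3, 2, 1, 0].foldl
      (fun acc (exp : Nat) => if PySem.Int.band r ((1 : Int) <<< exp) ≠ 0 then acc ++ [VALUE_NAMES.getD exp ""] else acc)
      (PySem.List.pyRepeat ["1"] q)
  else []

-- B's _entries helper: the strings emitted for one length.
def entriesB (note : Option Int) (length : String) (volS : String) (cmdVal : Option Int) (speed : Int) : List String :=
  let out : List String :=
    match cmdVal with
    | some c => ["t" ++ PySem.Int.toStr (PySem.Int.floordiv 2500 c * speed) ++ "\n\n"]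
    | none => []
  out ++
    [match note with
     | none => "r-" ++ length
     | some n =>
       if n ≥ 120 then "r-" ++ length
       else
         let octave := PySem.Int.floordiv (n - 9) 12
         let idx := PySem.Int.mod (n - 9) 12
         if 1 ≤ octave ∧ octave ≤ 7 then
           NOTE_NAMES.getD idx.toNat "" ++ PySem.Int.toStr octave ++ length ++ volS
         else if octave = 0 then "K-" ++ length
         else if octave = 8 then "S-" ++ length
         else "x-" ++ length ++ volS]

def note_format_alt (note : Option Int) (rows : Int) (vol : Option Int) (cmdVal : Option Int) (speed : Int) : String :=
  let volS := volStrB vol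
  let strings := (lengthsB rows).flatMap (fun length => entriesB note length volS cmdVal speed)
  if strings ≠ [] then PySem.Str.join "\n" strings ++ "\n" else ""

-- ===== PRECONDITION & SPEC =====
-- A raises ZeroDivisionError exactly when cmdVal == 0 and the length loop runs (rows > 0); excluded.
def Pre_note_format (note : Option Int) (rows : Int) (vol : Option Int) (cmdVal : Option Int) (speed : Int) : Prop :=
  ¬ (cmdVal = some 0 ∧ 0 < rows)
instance (note : Option Int) (rows : Int) (vol : Option Int) (cmdVal : Option Int) (speed : Int) : Decidable (Pre_note_format note rows vol cmdVal speed) := by unfold Pre_note_format; infer_instance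

def pvWitness_note_format : Option Int × Int × Option Int × Option Int × Int := (some 60, 19, some 7, some 100, 6)

def Spec_note_format (note : Option Int) (rows : Int) (vol : Option Int) (cmdVal : Option Int) (speed : Int) (out : String) : Prop := out = note_format_alt note rows vol cmdVal speed
instance (note : Option Int) (rows : Int) (vol : Option Int) (cmdVal : Option Int) (speed : Int) (out : String) : Decidable (Spec_note_format note rows vol cmdVal speed out) := by unfold Spec_note_format; infer_instance

-- ===== CLAIM (what is proved, stated in full; the proofs are below) =====
def Claim_equal_note_format : Prop := ∀ (note : Option Int) (rows : Int) (vol : Option Int) (cmdVal : Option Int) (speed : Int), Dom_note_format note rows vol cmdVal speed → Pre_note_format note rows vol cmdVal speed → Spec_note_format note rows vol cmdVal speed (note_format note rows vol cmdVal speed)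

-- ===== LEMMAS AND PROOFS =====

theorem volStr_eq (vol : Option Int) : volStrA vol = volStrB vol := by
  match vol with
  | none => rfl
  | some v =>
    simp only [volStrA, volStrB]
    by_cases h15 : 15 ≤ v
    · have hmin : min v 15 = 15 := by omega
      rw [hmin]
      split_ifs <;> first | rfl | omega
    · by_cases h10 : 10 ≤ v
      · interval_cases v <;> decide
      · split_ifs <;> first | rfl | omega

-- one greedy step of A on 0 < rows < 16, stated on B's side (both sides closed per literal)
theorem lengthsB_small_step (rows : Int) (h0 : 0 < rows) (hlt : rows < 16) :
    lengthsB rows =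
      VALUE_NAMES.getD (min 4 (Nat.log2 rows.toNat)) "" ::
        lengthsB (rows - 2 ^ (min 4 (Nat.log2 rows.toNat))) := by
  interval_cases rows <;> decide

-- one greedy step of A on 16 ≤ rows, stated on B's side
theorem lengthsB_big_step (rows : Int) (h : 16 ≤ rows) :
    lengthsB rows = "1" :: lengthsB (rows - 16) := by
  by_cases h16 : rows = 16
  · subst h16; decide
  · have h0 : (0 : Int) < rows := by omega
    have h0' : (0 : Int) < rows - 16 := by omega
    simp only [lengthsB, if_pos h0, if_pos h0']
    rw [PySem.Int.mod_eq_emod_of_pos (show (0:Int) < 16 by norm_num),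
        PySem.Int.mod_eq_emod_of_pos (show (0:Int) < 16 by norm_num),
        PySem.Int.floordiv_eq_ediv_of_pos (show (0:Int) < 16 by norm_num),
        PySem.Int.floordiv_eq_ediv_of_pos (show (0:Int) < 16 by norm_num)]
    have hm : (rows - 16) % 16 = rows % 16 := by omega
    have hd : (rows - 16) / 16 = rows / 16 - 1 := by omega
    have ht : (rows / 16).toNat = ((rows / 16 - 1).toNat) + 1 := by omega
    rw [hm, hd, PySem.List.pyRepeat_singleton, PySem.List.pyRepeat_singleton, ht, List.replicate_succ]
    simp only [List.foldl_cons, List.foldl_nil]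
    split_ifs <;> simp

theorem lengthsB_nonpos (rows : Int) (h : rows ≤ 0) : lengthsB rows = [] := by
  simp only [lengthsB, if_neg (by omega : ¬ rows > 0)]

theorem lengthsGoA_eq (fuel : Nat) (rows : Int) (hf : rows.toNat ≤ fuel) :
    lengthsGoA fuel rows = lengthsB rows := by
  induction fuel generalizing rows with
  | zero =>
    rw [lengthsB_nonpos rows (by omega)]
    rfl
  | succ fuel ih =>
    by_cases h0 : rows > 0
    · by_cases h16 : 16 ≤ rows
      · have hl : min 4 (Nat.log2 rows.toNat) = 4 := by
          have : 4 ≤ Nat.log2 rows.toNat := (Nat.le_log2 (by omega)).mpr (by omega)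
          omega
        simp only [lengthsGoA, if_pos h0, hl]
        rw [show ((2:Int) ^ (4:Nat)) = 16 by norm_num, ih (rows - 16) (by omega),
            lengthsB_big_step rows h16]
        rfl
      · have hpow : (0 : Int) < 2 ^ (min 4 (Nat.log2 rows.toNat)) := by positivity
        simp only [lengthsGoA, if_pos h0]
        rw [ih (rows - 2 ^ (min 4 (Nat.log2 rows.toNat))) (by omega),
            lengthsB_small_step rows h0 (by omega)]
    · simp only [lengthsGoA, if_neg h0]
      rw [lengthsB_nonpos rows (by omega)]

-- A's loop body appends exactly entriesB for each length
theorem bodyA_eq (note : Option Int) (volS : String) (cmdVal : Option Int) (speed : Int)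
    (acc : List String) (length : String) :
    bodyA note volS cmdVal speed acc length = acc ++ entriesB note length volS cmdVal speed := by
  cases note with
  | none => cases cmdVal <;> simp [bodyA, entriesB]
  | some n =>
    cases cmdVal <;>
      (simp only [bodyA, entriesB]
       by_cases hn : n < 120
       · rw [if_pos hn, if_neg (show ¬ n ≥ 120 by omega)]
         split_ifs <;> simp
       · rw [if_neg hn, if_pos (show n ≥ 120 by omega)]
         simp)

theorem note_format_eq_alt (note : Option Int) (rows : Int) (vol : Option Int) (cmdVal : Option Int) (speed : Int) :
    note_format note rows vol cmdVal speed = note_format_alt note rows vol cmdVal speed := by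
  simp only [note_format, note_format_alt, volStr_eq vol, lengthsGoA_eq rows.toNat rows (le_refl _)]
  have hfold : List.foldl (bodyA note (volStrB vol) cmdVal speed) ([] : List String) (lengthsB rows)
      = List.flatMap (fun length => entriesB note length (volStrB vol) cmdVal speed) (lengthsB rows) := by
    rw [PySem.List.foldl_congr_mem (lengthsB rows) (bodyA note (volStrB vol) cmdVal speed)
          (fun acc length => acc ++ entriesB note length (volStrB vol) cmdVal speed) []
          (fun acc length _ => bodyA_eq note (volStrB vol) cmdVal speed acc length)]
    rw [PySem.List.foldl_append_eq_flatMap]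
    simp
  rw [hfold]

-- ===== VERDICT (by name: the statement is the Claim_ definition above) =====
theorem note_format_spec : Claim_equal_note_format := by
  intro note rows vol cmdVal speed _ _
  unfold Spec_note_format
  exact note_format_eq_alt note rows vol cmdVal speed
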